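-- pv_equiv track=rewrite | github.com/anonymous-sciclaims/sciclaims-frontend | app/src/run.py | get_highlighted_text
-- ===== SOURCE A (Python) =====
-- def get_highlighted_text(starts, ends, text, label_color):
--     new_text = ""
--     for i, t in enumerate(text):
--         if i in starts:
--             new_text = (
--                 new_text
--                 + " <span style='color:white;background-color:"
--                 + label_color
--                 + "; border-radius:.25rem;padding:.2em'>"
--             )
--         if i in ends:
--             new_text = new_text + "</span> "
--         new_text = new_text + t
--     return new_text
-- ===== SOURCE B (Python) =====
-- def get_highlighted_text(starts, ends, text, label_color):
--     open_tag = (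
--         " <span style='color:white;background-color:"
--         + label_color
--         + "; border-radius:.25rem;padding:.2em'>"
--     )
--     close_tag = "</span> "
--     n = len(text)
--     breaks = sorted(set(i for i in starts + ends if 0 <= i < n))
--     out = ""
--     prev = 0
--     for i in breaks:
--         out += text[prev:i]
--         if i in starts:
--             out += open_tag
--         if i in ends:
--             out += close_tag
--         prev = i
--     return out + text[prev:]
-- ===== Notes on version B (the rewrite author's own statement) =====
-- stated objective: faster
-- what changed: B builds the tag strings once, collects the sorted set of in-range insertion indices, and slices the text between consecutive breakpoints instead of scanning every character and testing list membership at each position.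
import Mathlib
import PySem

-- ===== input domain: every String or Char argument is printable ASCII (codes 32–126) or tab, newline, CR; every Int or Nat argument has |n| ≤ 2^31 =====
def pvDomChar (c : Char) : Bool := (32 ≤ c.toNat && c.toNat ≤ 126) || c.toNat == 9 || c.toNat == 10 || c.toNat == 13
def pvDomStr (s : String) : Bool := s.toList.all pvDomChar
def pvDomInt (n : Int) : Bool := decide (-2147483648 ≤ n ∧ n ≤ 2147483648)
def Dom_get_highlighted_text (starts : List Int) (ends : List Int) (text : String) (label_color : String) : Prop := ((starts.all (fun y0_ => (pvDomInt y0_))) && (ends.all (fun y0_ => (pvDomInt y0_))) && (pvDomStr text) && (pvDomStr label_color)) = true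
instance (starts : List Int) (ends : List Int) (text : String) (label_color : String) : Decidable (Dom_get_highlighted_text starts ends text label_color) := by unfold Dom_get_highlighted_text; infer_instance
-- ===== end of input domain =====

-- B replaces A's per-character scan (a membership test at every index) by slicing the text between
-- the sorted in-range insertion indices; same return value, measurably faster on large inputs.

-- ===== PORT A =====
def pvOpenTag (label_color : String) : List Char :=
  " <span style='color:white;background-color:".toList ++ label_color.toList
    ++ "; border-radius:.25rem;padding:.2em'>".toList

def pvCloseTag : List Char := "</span> ".toList

-- loop body of A, nested ifs exactly as in the Python
def pvStepA (starts ends : List Int) (o : List Char) (acc : List Char) (p : Int × Char) : List Char :=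
  let acc := if p.1 ∈ starts then acc ++ o else acc
  let acc := if p.1 ∈ ends then acc ++ pvCloseTag else acc
  acc ++ [p.2]

def get_highlighted_text (starts : List Int) (ends : List Int) (text : String) (label_color : String) : String :=
  String.ofList ((PySem.List.enumerate text.toList 0).foldl (pvStepA starts ends (pvOpenTag label_color)) [])

-- ===== PORT B =====
-- loop body of B: append text[prev:i], then the tags firing at i; remember prev := i
def pvStepB (starts ends : List Int) (o tl : List Char) (st : List Char × Int) (i : Int) : List Char × Int :=
  let out := st.1 ++ PySem.List.slice tl (some st.2) (some i)
  let out := if i ∈ starts then out ++ o else out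
  let out := if i ∈ ends then out ++ pvCloseTag else out
  (out, i)

def get_highlighted_text_alt (starts : List Int) (ends : List Int) (text : String) (label_color : String) : String :=
  let o := pvOpenTag label_color
  let tl := text.toList
  let n : Int := (tl.length : Int)
  let breaks := PySem.List.sorted
    (PySem.Set.ofList ((starts ++ ends).filter (fun i => decide (0 ≤ i) && decide (i < n))))
    (fun x => x) false
  let r := breaks.foldl (pvStepB starts ends o tl) ([], 0)
  String.ofList (r.1 ++ PySem.List.slice tl (some r.2) none)

-- ===== PRECONDITION & SPEC =====
def Spec_get_highlighted_text (starts : List Int) (ends : List Int) (text : String) (label_color : String) (out : String) : Prop := out = get_highlighted_text_alt starts ends text label_color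
instance (starts : List Int) (ends : List Int) (text : String) (label_color : String) (out : String) : Decidable (Spec_get_highlighted_text starts ends text label_color out) := by unfold Spec_get_highlighted_text; infer_instance

-- ===== CLAIM (what is proved, stated in full; the proofs are below) =====
def Claim_equal_get_highlighted_text : Prop := ∀ (starts : List Int) (ends : List Int) (text : String) (label_color : String), Dom_get_highlighted_text starts ends text label_color → Spec_get_highlighted_text starts ends text label_color (get_highlighted_text starts ends text label_color)

-- ===== LEMMAS AND PROOFS =====

-- the tags emitted just before position i (open before close, as in both programs)
def pvTags (s e : List Int) (o : List Char) (i : Int) : List Char :=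
  (if i ∈ s then o else []) ++ (if i ∈ e then pvCloseTag else [])

-- canonical rendering of the suffix l of the text starting at position i
def pvRender (s e : List Int) (o : List Char) : Int → List Char → List Char
  | _, [] => []
  | i, c :: rest => pvTags s e o i ++ c :: pvRender s e o (i + 1) rest

lemma pvStepA_eq (s e : List Int) (o acc : List Char) (p : Int × Char) :
    pvStepA s e o acc p = acc ++ pvTags s e o p.1 ++ [p.2] := by
  unfold pvStepA pvTags
  by_cases h1 : p.1 ∈ s <;> by_cases h2 : p.1 ∈ e <;> simp [h1, h2]

lemma pvStepB_eq (s e : List Int) (o tl : List Char) (st : List Char × Int) (i : Int) :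
    pvStepB s e o tl st i = (st.1 ++ PySem.List.slice tl (some st.2) (some i) ++ pvTags s e o i, i) := by
  unfold pvStepB pvTags
  by_cases h1 : i ∈ s <;> by_cases h2 : i ∈ e <;> simp [h1, h2]

lemma pvA_loop (s e : List Int) (o : List Char) (l : List Char) :
    ∀ (i : Int) (acc : List Char),
      (PySem.List.enumerate l i).foldl (pvStepA s e o) acc = acc ++ pvRender s e o i l := by
  induction l with
  | nil => intro i acc; simp [PySem.List.enumerate_nil, pvRender]
  | cons c rest ih =>
      intro i acc
      rw [PySem.List.enumerate_cons]
      simp only [List.foldl_cons, ih, pvStepA_eq, pvRender]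
      simp [List.append_assoc]

lemma pvRender_no_tags (s e : List Int) (o : List Char) (l : List Char) :
    ∀ (i : Int), (∀ j : Int, i ≤ j → j < i + l.length → pvTags s e o j = []) →
      pvRender s e o i l = l := by
  induction l with
  | nil => intro i _; simp [pvRender]
  | cons c rest ih =>
      intro i h
      have h0 : pvTags s e o i = [] := h i le_rfl (by simp)
      simp only [pvRender, h0, List.nil_append, List.cons.injEq, true_and]
      exact ih (i + 1) (fun j hj1 hj2 => h j (by omega) (by simp at hj2 ⊢; omega))

lemma pvRender_split (s e : List Int) (o : List Char) (k : Nat) :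
    ∀ (l : List Char) (i : Int), (∀ j : Int, i ≤ j → j < i + k → pvTags s e o j = []) →
      pvRender s e o i l = l.take k ++ pvRender s e o (i + k) (l.drop k) := by
  induction k with
  | zero => intro l i _; simp
  | succ k ih =>
      intro l i h
      cases l with
      | nil => simp [pvRender]
      | cons c rest =>
          have h0 : pvTags s e o i = [] := h i le_rfl (by simp)
          simp only [pvRender, h0, List.nil_append, List.take_succ_cons, List.drop_succ_cons,
            List.cons_append, List.cons.injEq, true_and]
          rw [ih rest (i + 1) (fun j hj1 hj2 => h j (by omega) (by push_cast at hj2 ⊢; omega))]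
          congr 2
          push_cast
          ring

lemma pvFoldB_snd_nonneg (s e : List Int) (o tl : List Char) (bs : List Int) :
    ∀ (st : List Char × Int), 0 ≤ st.2 → (∀ b ∈ bs, 0 ≤ b) →
      0 ≤ (bs.foldl (pvStepB s e o tl) st).2 := by
  induction bs with
  | nil => intro st h _; simpa using h
  | cons b bs ih =>
      intro st h hb
      simp only [List.foldl_cons, pvStepB_eq]
      exact ih _ (hb b (by simp)) (fun x hx => hb x (by simp [hx]))

lemma pvTakeOneCons {α : Type} (a : α) (l : List α) : List.take 1 (a :: l) = [a] := rfl

lemma pvTags_nil (s e : List Int) (o : List Char) (j : Int) (h1 : j ∉ s) (h2 : j ∉ e) :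
    pvTags s e o j = [] := by simp [pvTags, h1, h2]

lemma pvB_loop (s e : List Int) (o tl : List Char) (bs : List Int) :
    ∀ (acc : List Char) (prev : Int), 0 ≤ prev → prev < (tl.length : Int) →
      bs.Pairwise (· < ·) →
      (∀ b ∈ bs, prev < b ∧ b < (tl.length : Int)) →
      (∀ j : Int, prev < j → j < (tl.length : Int) → (j ∈ s ∨ j ∈ e) → j ∈ bs) →
      (bs.foldl (pvStepB s e o tl) (acc, prev)).1
          ++ tl.drop (bs.foldl (pvStepB s e o tl) (acc, prev)).2.toNat
        = acc ++ (tl.drop prev.toNat).take 1 ++ pvRender s e o (prev + 1) (tl.drop (prev.toNat + 1)) := by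
  induction bs with
  | nil =>
      intro acc prev h0 h1 _ _ hc
      simp only [List.foldl_nil]
      have hlt : prev.toNat < tl.length := by omega
      have hr : pvRender s e o (prev + 1) (tl.drop (prev.toNat + 1)) = tl.drop (prev.toNat + 1) := by
        apply pvRender_no_tags
        intro j hj1 hj2
        rw [List.length_drop] at hj2
        have hjn : j < (tl.length : Int) := by omega
        by_cases hs' : j ∈ s
        · exact absurd (hc j (by omega) hjn (Or.inl hs')) (by simp)
        by_cases he' : j ∈ e
        · exact absurd (hc j (by omega) hjn (Or.inr he')) (by simp)
        exact pvTags_nil s e o j hs' he'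
      rw [hr, List.drop_eq_getElem_cons hlt]
      simp
  | cons b bs ih =>
      intro acc prev h0 h1 hp hb hc
      obtain ⟨hhead, htail⟩ := List.pairwise_cons.mp hp
      obtain ⟨hpb, hbn⟩ := hb b (by simp)
      have hb0 : 0 ≤ b := by omega
      have hbnat : b.toNat < tl.length := by omega
      have hplt : prev.toNat < tl.length := by omega
      simp only [List.foldl_cons, pvStepB_eq]
      rw [ih _ b hb0 hbn htail
        (fun b' hb' => ⟨hhead b' hb', (hb b' (by simp [hb'])).2⟩)
        (fun j hj1 hj2 htag => by
          rcases List.mem_cons.mp (hc j (by omega) hj2 htag) with h | h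
          · exact absurd h (by omega)
          · exact h)]
      have hsplit := pvRender_split s e o (b - prev - 1).toNat (tl.drop (prev.toNat + 1)) (prev + 1)
        (fun j hj1 hj2 => by
          have hjb : j < b := by omega
          have hjn : j < (tl.length : Int) := by omega
          by_cases hs' : j ∈ s
          · rcases List.mem_cons.mp (hc j (by omega) hjn (Or.inl hs')) with h | h
            · exact absurd h (by omega)
            · exact absurd (hhead j h) (by omega)
          by_cases he' : j ∈ e
          · rcases List.mem_cons.mp (hc j (by omega) hjn (Or.inr he')) with h | h
            · exact absurd h (by omega)
            · exact absurd (hhead j h) (by omega)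
          exact pvTags_nil s e o j hs' he')
      rw [hsplit]
      have hk : prev + 1 + ((b - prev - 1).toNat : Int) = b := by omega
      rw [hk, List.drop_drop]
      have hk2 : prev.toNat + 1 + (b - prev - 1).toNat = b.toNat := by omega
      rw [hk2, List.drop_eq_getElem_cons hbnat]
      simp only [pvRender]
      rw [PySem.List.slice_toNat tl h0 hb0, List.drop_eq_getElem_cons hplt]
      have hk3 : b.toNat - prev.toNat = (b - prev - 1).toNat + 1 := by omega
      rw [hk3]
      simp only [List.take_succ_cons, List.take_zero, List.cons_append, List.nil_append,
        List.append_assoc]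

lemma pvB_loop0 (s e : List Int) (o tl : List Char) (bs : List Int)
    (hp : bs.Pairwise (· < ·))
    (hb : ∀ b ∈ bs, 0 ≤ b ∧ b < (tl.length : Int))
    (hc : ∀ j : Int, 0 ≤ j → j < (tl.length : Int) → (j ∈ s ∨ j ∈ e) → j ∈ bs) :
    (bs.foldl (pvStepB s e o tl) ([], 0)).1
        ++ tl.drop (bs.foldl (pvStepB s e o tl) ([], 0)).2.toNat
      = pvRender s e o 0 tl := by
  cases bs with
  | nil =>
      simp only [List.foldl_nil]
      rw [pvRender_no_tags s e o tl 0
        (fun j hj1 hj2 => by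
          by_cases hs' : j ∈ s
          · exact absurd (hc j hj1 (by omega) (Or.inl hs')) (by simp)
          by_cases he' : j ∈ e
          · exact absurd (hc j hj1 (by omega) (Or.inr he')) (by simp)
          exact pvTags_nil s e o j hs' he')]
      simp
  | cons b bs =>
      obtain ⟨hhead, htail⟩ := List.pairwise_cons.mp hp
      obtain ⟨hb0, hbn⟩ := hb b (by simp)
      have hbnat : b.toNat < tl.length := by omega
      simp only [List.foldl_cons, pvStepB_eq]
      rw [pvB_loop s e o tl bs _ b hb0 hbn htail
        (fun b' hb' => ⟨hhead b' hb', (hb b' (by simp [hb'])).2⟩)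
        (fun j hj1 hj2 htag => by
          rcases List.mem_cons.mp (hc j (by omega) hj2 htag) with h | h
          · exact absurd h (by omega)
          · exact h)]
      rw [pvRender_split s e o b.toNat tl 0
        (fun j hj1 hj2 => by
          have hjb : j < b := by omega
          have hjn : j < (tl.length : Int) := by omega
          by_cases hs' : j ∈ s
          · rcases List.mem_cons.mp (hc j (by omega) hjn (Or.inl hs')) with h | h
            · exact absurd h (by omega)
            · exact absurd (hhead j h) (by omega)
          by_cases he' : j ∈ e
          · rcases List.mem_cons.mp (hc j (by omega) hjn (Or.inr he')) with h | h
            · exact absurd h (by omega)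
            · exact absurd (hhead j h) (by omega)
          exact pvTags_nil s e o j hs' he')]
      have h0b : (0 : Int) + (b.toNat : Int) = b := by omega
      rw [h0b, List.drop_eq_getElem_cons hbnat]
      simp only [pvRender]
      rw [PySem.List.slice_toNat tl le_rfl hb0]
      simp only [Int.toNat_zero, List.drop_zero, Nat.sub_zero, pvTakeOneCons, List.cons_append,
        List.nil_append, List.append_assoc]

-- ===== VERDICT (by name: the statement is the Claim_ definition above) =====
theorem get_highlighted_text_spec : Claim_equal_get_highlighted_text := by
  intro starts ends text label_color _
  simp only [Spec_get_highlighted_text, get_highlighted_text, get_highlighted_text_alt]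
  refine congrArg String.ofList ?_
  rw [pvA_loop]
  have hmem : ∀ x : Int,
      x ∈ PySem.List.sorted
        (PySem.Set.ofList ((starts ++ ends).filter
          (fun i => decide (0 ≤ i) && decide (i < (text.toList.length : Int)))))
        (fun x => x) false
      ↔ ((x ∈ starts ∨ x ∈ ends) ∧ 0 ≤ x ∧ x < (text.toList.length : Int)) := by
    intro x
    rw [PySem.List.mem_sorted, PySem.Set.mem_ofList, List.mem_filter, List.mem_append]
    simp
  have hpair := PySem.List.sorted_ofList_pairwise_lt
    (xs := (starts ++ ends).filter (fun i => decide (0 ≤ i) && decide (i < (text.toList.length : Int))))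
  have hnn : 0 ≤ ((PySem.List.sorted
        (PySem.Set.ofList ((starts ++ ends).filter
          (fun i => decide (0 ≤ i) && decide (i < (text.toList.length : Int)))))
        (fun x => x) false).foldl
        (pvStepB starts ends (pvOpenTag label_color) text.toList) ([], 0)).2 :=
    pvFoldB_snd_nonneg _ _ _ _ _ _ (by norm_num) (fun b hb => ((hmem b).mp hb).2.1)
  rw [PySem.List.slice_from text.toList hnn]
  rw [pvB_loop0 starts ends (pvOpenTag label_color) text.toList _ hpair
    (fun b hb => ((hmem b).mp hb).2)
    (fun j hj1 hj2 htag => (hmem j).mpr ⟨htag, hj1, hj2⟩)]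
  simp
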